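-- pv_equiv track=rewrite | github.com/adityapandey9165/DSA-Pattern-Based-Solutions | python/Two Pointers/medium/LeetCode: 3634. Minimum Removals to Balance Array.py | minRemoval_binarySearch
-- ===== SOURCE A (Python) =====
-- from typing import List
-- import bisect
--
-- def minRemoval_binarySearch(nums: List[int], k: int) -> int:
--     n = len(nums)
--     nums.sort()
--     max_keep = 0
--
--     for l in range(n):
--         limit = nums[l] * k
--         r = bisect.bisect_right(nums, limit)
--         max_keep = max(max_keep, r - l)
--
--     return n - max_keep
-- ===== SOURCE B (Python) =====
-- from typing import List
--
-- def minRemoval_binarySearch(nums: List[int], k: int) -> int: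
--     # Two-pointer sweep instead of per-index binary search.
--     # (Sorts nums in place, like the original.)
--     nums.sort()
--     n = len(nums)
--     max_keep = 0
--     r = 0
--     for l in range(n):
--         limit = nums[l] * k
--         while r < n and nums[r] <= limit:
--             r += 1
--         if r - l > max_keep:
--             max_keep = r - l
--     return n - max_keep
-- ===== Notes on version B (the rewrite author's own statement) =====
-- stated objective: faster
-- what changed: Replaces the per-index bisect_right binary search with a single monotone two-pointer sweep whose right pointer never retreats; a stale pointer can only yield windows already dominated by an earlier one, so the maximum kept window (and hence the answer) is unchanged for every k.
import Mathlib
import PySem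

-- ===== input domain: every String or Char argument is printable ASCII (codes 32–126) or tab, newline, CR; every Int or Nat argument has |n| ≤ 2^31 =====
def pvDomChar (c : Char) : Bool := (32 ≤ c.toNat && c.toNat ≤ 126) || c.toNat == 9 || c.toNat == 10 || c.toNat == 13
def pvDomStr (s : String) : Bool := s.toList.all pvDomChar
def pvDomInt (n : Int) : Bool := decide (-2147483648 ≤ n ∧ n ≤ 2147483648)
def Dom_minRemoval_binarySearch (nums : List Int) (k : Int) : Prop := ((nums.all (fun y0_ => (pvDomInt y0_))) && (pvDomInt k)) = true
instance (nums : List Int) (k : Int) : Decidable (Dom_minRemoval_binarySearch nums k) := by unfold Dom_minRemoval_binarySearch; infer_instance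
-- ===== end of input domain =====

-- B replaces the per-index bisect_right with one monotone two-pointer sweep (constant-factor
-- speedup of the scan). Both Pythons sort `nums` in place; the equivalence proved here is
-- about the RETURN value.

-- ===== PORT A =====
def minRemoval_binarySearch (nums : List Int) (k : Int) : Int :=
  let n := nums.length
  let s := PySem.List.sorted nums (fun x => x) false
  let max_keep : Int :=
    (PySem.List.pyRange 0 (n : Int) 1).foldl (fun mk l =>
      let limit := (PySem.List.pyGetD s l 0) * k   -- l is always in range
      let r := PySem.List.bisectRight s limit
      max mk ((r : Int) - l)) 0
  (n : Int) - max_keep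

-- ===== PORT B =====
-- the `while r < n and nums[r] <= limit: r += 1` loop of Source B
def pvAdvance (s : List Int) (limit : Int) (r : Nat) : Nat :=
  if h : r < s.length then
    if s[r] ≤ limit then pvAdvance s limit (r + 1) else r
  else r
termination_by s.length - r

def minRemoval_binarySearch_alt (nums : List Int) (k : Int) : Int :=
  let s := PySem.List.sorted nums (fun x => x) false
  let n := s.length
  let res : Nat × Int :=
    (PySem.List.pyRange 0 (n : Int) 1).foldl (fun st l =>
      let limit := (PySem.List.pyGetD s l 0) * k   -- l is always in range
      let r := pvAdvance s limit st.1
      (r, if (r : Int) - l > st.2 then (r : Int) - l else st.2)) (0, 0)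
  (n : Int) - res.2

-- ===== PRECONDITION & SPEC =====
def Spec_minRemoval_binarySearch (nums : List Int) (k : Int) (out : Int) : Prop := out = minRemoval_binarySearch_alt nums k
instance (nums : List Int) (k : Int) (out : Int) : Decidable (Spec_minRemoval_binarySearch nums k out) := by unfold Spec_minRemoval_binarySearch; infer_instance

-- ===== CLAIM (what is proved, stated in full; the proofs are below) =====
def Claim_equal_minRemoval_binarySearch : Prop := ∀ (nums : List Int) (k : Int), Dom_minRemoval_binarySearch nums k → Spec_minRemoval_binarySearch nums k (minRemoval_binarySearch nums k)

-- ===== LEMMAS AND PROOFS =====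

-- the while-loop lands exactly on max r (bisectRight s limit) when s is sorted
theorem pvAdvance_eq (s : List Int) (limit : Int)
    (hs : List.Pairwise (fun a b => a ≤ b) s) :
    ∀ (d r : Nat), s.length - r ≤ d → r ≤ s.length →
      pvAdvance s limit r = max r (PySem.List.bisectRight s limit) := by
  obtain ⟨hc1, hc2, hc3⟩ := PySem.List.bisectRight_spec s limit hs
  intro d
  induction d with
  | zero =>
    intro r hd hr
    have hrl : r = s.length := by omega
    rw [pvAdvance]
    simp only [hrl, dif_neg (lt_irrefl s.length)]
    omega
  | succ d ih =>
    intro r hd hr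
    rw [pvAdvance]
    by_cases h : r < s.length
    · simp only [dif_pos h]
      by_cases hle : s[r] ≤ limit
      · simp only [if_pos hle]
        have hrc : r < PySem.List.bisectRight s limit := by
          by_contra hcon
          exact absurd hle (not_le.mpr (hc3 r h (by omega)))
        rw [ih (r + 1) (by omega) (by omega)]
        omega
      · simp only [if_neg hle]
        have : PySem.List.bisectRight s limit ≤ r := by
          by_contra hcon
          exact hle (hc2 r h (by omega))
        omega
    · simp only [dif_neg h]
      omega

-- one invariant carries the sweep past any stale right pointer:
-- mkA = mkB, r ≤ n, and (r : Int) - lo ≤ mk at the head of iteration lo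
theorem loop_eq (s : List Int) (k : Int)
    (hs : List.Pairwise (fun a b => a ≤ b) s) :
    ∀ (d lo r : Nat) (mk : Int), s.length - lo ≤ d → r ≤ s.length → (r : Int) - lo ≤ mk →
      (PySem.List.pyRange (lo : Int) (s.length : Int) 1).foldl
        (fun mk l =>
          max mk ((PySem.List.bisectRight s (PySem.List.pyGetD s l 0 * k) : Int) - l)) mk
      =
      ((PySem.List.pyRange (lo : Int) (s.length : Int) 1).foldl
        (fun st l =>
          (pvAdvance s (PySem.List.pyGetD s l 0 * k) st.1,
            if (pvAdvance s (PySem.List.pyGetD s l 0 * k) st.1 : Int) - l > st.2 then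
              (pvAdvance s (PySem.List.pyGetD s l 0 * k) st.1 : Int) - l
            else st.2)) (r, mk)).2 := by
  intro d
  induction d with
  | zero =>
    intro lo r mk hd hr hmk
    have hlo : s.length ≤ lo := by omega
    rw [PySem.List.pyRange_one_eq_nil (by exact_mod_cast hlo)]
    simp [List.foldl]
  | succ d ih =>
    intro lo r mk hd hr hmk
    by_cases h : lo < s.length
    · rw [PySem.List.pyRange_one_cons (by exact_mod_cast h)]
      simp only [List.foldl_cons]
      have hcast : ((lo : Int) + 1) = ((lo + 1 : Nat) : Int) := by push_cast; ring
      obtain ⟨hc1, hc2, hc3⟩ := PySem.List.bisectRight_spec s ((PySem.List.pyGetD s (lo : Int) 0) * k) hs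
      set c := PySem.List.bisectRight s ((PySem.List.pyGetD s (lo : Int) 0) * k) with hcdef
      have hadv : pvAdvance s ((PySem.List.pyGetD s (lo : Int) 0) * k) r = max r c :=
        pvAdvance_eq s _ hs (s.length - r) r (le_refl _) hr
      rw [hadv]
      have hinit : (if ((max r c : Nat) : Int) - (lo : Int) > mk then ((max r c : Nat) : Int) - (lo : Int) else mk)
          = max mk ((c : Int) - (lo : Int)) := by
        push_cast
        split_ifs <;> omega
      rw [hinit, hcast]
      exact ih (lo + 1) (max r c) (max mk ((c : Int) - (lo : Int)))
        (by omega) (by omega) (by push_cast; omega)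
    · rw [PySem.List.pyRange_one_eq_nil (by exact_mod_cast (by omega : s.length ≤ lo))]
      simp [List.foldl]

-- ===== VERDICT (by name: the statement is the Claim_ definition above) =====
theorem minRemoval_binarySearch_spec : Claim_equal_minRemoval_binarySearch := by
  intro nums k _
  unfold Spec_minRemoval_binarySearch
  simp only [minRemoval_binarySearch, minRemoval_binarySearch_alt]
  have hlen : (PySem.List.sorted nums (fun x => x) false).length = nums.length :=
    PySem.List.length_sorted nums (fun x => x) false
  have hs : List.Pairwise (fun a b => a ≤ b) (PySem.List.sorted nums (fun x => x) false) :=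
    PySem.List.sorted_pairwise nums (fun x => x)
  have h := loop_eq (PySem.List.sorted nums (fun x => x) false) k hs
    ((PySem.List.sorted nums (fun x => x) false).length) 0 0 0
    (by omega) (by omega) (by omega)
  simp only [Nat.cast_zero, hlen] at h ⊢
  rw [h]
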